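-- pv_equiv track=rewrite | github.com/TymekTM/Gaja-server | integrations/telegram/service.py | _unfold_ics_lines
-- ===== SOURCE A (Python) =====
-- def _unfold_ics_lines(ics_text: str) -> list[str]:
--     raw_lines = ics_text.splitlines()
--     unfolded: list[str] = []
--     buffer: str | None = None
--     for line in raw_lines:
--         if line.startswith(" ") or line.startswith("\t"):
--             if buffer is not None:
--                 buffer += line[1:]
--             continue
--         if buffer is not None:
--             unfolded.append(buffer)
--         buffer = line
--     if buffer is not None:
--         unfolded.append(buffer)
--     return unfolded
-- ===== SOURCE B (Python) =====
-- def _span_cont(lines, i):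
--     """First index >= i that is not a continuation line (space/tab-led)."""
--     while i < len(lines) and lines[i][:1] in (" ", "\t"):
--         i += 1
--     return i
--
--
-- def _unfold_ics_lines(ics_text: str) -> list[str]:
--     lines = ics_text.splitlines()
--     # leading continuation lines have no head line to attach to: dropped
--     i = _span_cont(lines, 0)
--     out = []
--     while i < len(lines):
--         j = _span_cont(lines, i + 1)
--         out.append(lines[i] + "".join(line[1:] for line in lines[i + 1 : j]))
--         i = j
--     return out
-- ===== Notes on version B (the rewrite author's own statement) =====
-- stated objective: alternative
-- what changed: Replaces A's online buffer-and-flush state machine with chunk-wise grouping: an outer loop walks head-line positions, an inner scan (_span_cont) finds the extent of each continuation run, and each logical line is built at once by joining the head with the stripped run.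
import Mathlib
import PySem

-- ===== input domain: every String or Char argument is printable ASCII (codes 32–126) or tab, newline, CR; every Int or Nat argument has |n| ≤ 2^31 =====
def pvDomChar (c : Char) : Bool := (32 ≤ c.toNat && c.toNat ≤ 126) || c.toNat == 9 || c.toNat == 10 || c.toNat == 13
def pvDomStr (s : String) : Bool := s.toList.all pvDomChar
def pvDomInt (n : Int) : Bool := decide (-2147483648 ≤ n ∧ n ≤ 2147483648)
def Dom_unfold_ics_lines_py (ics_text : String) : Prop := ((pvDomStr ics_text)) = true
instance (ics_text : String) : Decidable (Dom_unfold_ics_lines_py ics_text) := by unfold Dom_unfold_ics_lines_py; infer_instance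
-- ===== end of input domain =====

-- B replaces A's buffer-and-flush state machine by chunk-wise grouping: it walks head
-- positions and builds each logical line at once by joining a head with its stripped
-- continuation run (alternative decomposition, same cost).

-- ===== PORT A =====
-- literal port of A: fold over splitlines with state (unfolded, buffer), flush after the loop
def unfold_ics_lines_py (ics_text : String) : List String :=
  let raw_lines := PySem.Str.splitlines ics_text
  let st := raw_lines.foldl (fun (st : List String × Option String) line =>
    if PySem.Str.startswith line " " || PySem.Str.startswith line "\t" then
      match st.2 with
      | some b => (st.1, some (b ++ PySem.Str.slice line (some 1) none))
      | none => st
    else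
      (st.1 ++ st.2.toList, some line)) ([], none)
  st.1 ++ st.2.toList

-- ===== PORT B =====
-- line[:1] in (" ", "\t")
def pvIsCont (l : String) : Bool :=
  PySem.Str.startswith l " " || PySem.Str.startswith l "\t"

-- line[1:]
def pvTail1 (l : String) : String := PySem.Str.slice l (some 1) none

-- "".join(strings)
def pvJoin (ls : List String) : String := ls.foldl (· ++ ·) ""

-- outer while loop: the inner `_span_cont` scan to j materialises the continuation run
-- lines[i+1:j] as `rest.takeWhile pvIsCont` and the advance `i = j` as `rest.dropWhile pvIsCont`
def pvGroups : List String → List String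
  | [] => []
  | h :: rest =>
      (h ++ pvJoin ((rest.takeWhile pvIsCont).map pvTail1)) :: pvGroups (rest.dropWhile pvIsCont)
termination_by l => l.length
decreasing_by
  simpa using Nat.lt_succ_of_le (List.length_dropWhile_le pvIsCont rest)

def unfold_ics_lines_py_alt (ics_text : String) : List String :=
  -- `i = _span_cont(lines, 0)` drops the leading continuation run
  pvGroups ((PySem.Str.splitlines ics_text).dropWhile pvIsCont)

-- ===== PRECONDITION & SPEC =====
def Spec_unfold_ics_lines_py (ics_text : String) (out : List String) : Prop := out = unfold_ics_lines_py_alt ics_text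
instance (ics_text : String) (out : List String) : Decidable (Spec_unfold_ics_lines_py ics_text out) := by unfold Spec_unfold_ics_lines_py; infer_instance

-- ===== CLAIM (what is proved, stated in full; the proofs are below) =====
def Claim_equal_unfold_ics_lines_py : Prop := ∀ (ics_text : String), Dom_unfold_ics_lines_py ics_text → Spec_unfold_ics_lines_py ics_text (unfold_ics_lines_py ics_text)

-- ===== LEMMAS AND PROOFS =====

lemma pvJoin_acc (a : String) (ls : List String) :
    ls.foldl (· ++ ·) a = a ++ pvJoin ls := by
  induction ls generalizing a with
  | nil => simp [pvJoin]
  | cons x xs ih =>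
    simp only [pvJoin, List.foldl_cons] at *
    rw [ih (a ++ x), ih ("" ++ x)]
    simp [String.append_assoc]

lemma pvJoin_cons (x : String) (xs : List String) :
    pvJoin (x :: xs) = x ++ pvJoin xs := by
  simp only [pvJoin, List.foldl_cons]
  rw [pvJoin_acc]
  simp [pvJoin]

-- A's step function, named
def pvStepA (st : List String × Option String) (line : String) : List String × Option String :=
  if PySem.Str.startswith line " " || PySem.Str.startswith line "\t" then
    match st.2 with
    | some b => (st.1, some (b ++ PySem.Str.slice line (some 1) none))
    | none => st
  else
    (st.1 ++ st.2.toList, some line)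

-- invariant: with a live buffer b, A's remaining loop + flush yields u ++ pvGroups (b :: lines)
lemma pv_inv (lines : List String) (u : List String) (b : String) :
    (let st := lines.foldl pvStepA (u, some b); st.1 ++ st.2.toList)
      = u ++ pvGroups (b :: lines) := by
  induction lines generalizing u b with
  | nil => simp [pvGroups, pvJoin]
  | cons line ls ih =>
    by_cases h : pvIsCont line = true
    · have hA : (PySem.Str.startswith line " " || PySem.Str.startswith line "\t") = true := h
      simp only [List.foldl_cons, pvStepA, hA, if_true]
      rw [ih u (b ++ PySem.Str.slice line (some 1) none)]
      simp only [pvGroups, List.takeWhile_cons, List.dropWhile_cons, h, if_true, List.map_cons,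
        pvJoin_cons]
      simp [pvTail1, String.append_assoc]
    · have hA : (PySem.Str.startswith line " " || PySem.Str.startswith line "\t") = false := by
        simpa [pvIsCont] using h
      simp only [List.foldl_cons, pvStepA, hA, Bool.false_eq_true, if_false, Option.toList_some]
      rw [ih (u ++ [b]) line]
      simp only [pvGroups, List.takeWhile_cons, List.dropWhile_cons, h, Bool.false_eq_true,
        if_false, List.map_nil]
      simp [pvJoin]

-- before the first head line A's buffer is none: the loop skips exactly the leading run
lemma pv_start (lines : List String) :
    (let st := lines.foldl pvStepA ([], none); st.1 ++ st.2.toList)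
      = pvGroups (lines.dropWhile pvIsCont) := by
  induction lines with
  | nil => simp [pvGroups]
  | cons line ls ih =>
    by_cases h : pvIsCont line = true
    · have hA : (PySem.Str.startswith line " " || PySem.Str.startswith line "\t") = true := h
      simp only [List.foldl_cons, pvStepA, hA, if_true, List.dropWhile_cons, h]
      simpa [h] using ih
    · have hA : (PySem.Str.startswith line " " || PySem.Str.startswith line "\t") = false := by
        simpa [pvIsCont] using h
      simp only [List.foldl_cons, pvStepA, hA, Bool.false_eq_true, if_false, Option.toList_none,
        List.nil_append, List.dropWhile_cons, h]
      simpa using pv_inv ls [] line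

-- ===== VERDICT (by name: the statement is the Claim_ definition above) =====
theorem unfold_ics_lines_py_spec : Claim_equal_unfold_ics_lines_py := by
  intro s _
  unfold Spec_unfold_ics_lines_py unfold_ics_lines_py unfold_ics_lines_py_alt
  exact pv_start (PySem.Str.splitlines s)
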